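-- pv_equiv track=rewrite | github.com/dipalisikand1965-blip/TDB1 | backend/services/dynamic_picks_generator.py | _generate_learn_picks
-- ===== SOURCE A (Python) =====
-- from typing import List, Dict, Optional
--
-- def _generate_learn_picks(user_msg: str, pet_name: str, pet_context: Dict) -> List[Dict]:
--     """Generate picks for LEARN pillar - training, education, behavior"""
--     picks = []
--
--     # Puppy training
--     if any(kw in user_msg for kw in ["puppy", "young", "new dog", "puppy school"]):
--         picks.append({
--             "type": "service",
--             "category": "puppy_training",
--             "title": f"Puppy School for {pet_name}",
--             "subtitle": "Foundation training for young dogs",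
--             "icon": "🐕",
--             "reason": "Set the right foundations early",
--             "cta": "Enroll Now",
--             "service_type": "puppy_school"
--         })
--
--     # Behavior training
--     if any(kw in user_msg for kw in ["behavior", "behaviour", "aggressive", "bark", "anxiety", "fear"]):
--         picks.append({
--             "type": "service",
--             "category": "behavior",
--             "title": f"Behavior Training for {pet_name}",
--             "subtitle": "Address behavioral challenges",
--             "icon": "🧠",
--             "reason": "Expert behavioral guidance",
--             "cta": "Book Consultation",
--             "service_type": "behavior_training"
--         })
--
--     # Obedience
--     if any(kw in user_msg for kw in ["obedience", "command", "sit", "stay", "come", "heel"]):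
--         picks.append({
--             "type": "service",
--             "category": "obedience",
--             "title": f"Obedience Classes for {pet_name}",
--             "subtitle": "Basic to advanced commands",
--             "icon": "🎓",
--             "reason": "Well-mannered companion",
--             "cta": "View Classes",
--             "service_type": "obedience_training"
--         })
--
--     return picks if picks else [{
--         "type": "service",
--         "category": "learn_consult",
--         "title": f"Training Consultation for {pet_name}",
--         "subtitle": "Personalized learning plan",
--         "icon": "📚",
--         "reason": f"Help {pet_name} reach their potential",
--         "cta": "Get Started",
--         "service_type": "training_consultation"
--     }]
-- ===== SOURCE B (Python) =====
-- from typing import List, Dict, Optional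
--
-- # Flat inverted index: keyword -> category id (0 = puppy, 1 = behavior, 2 = obedience).
-- _KEYWORD_CATEGORY = {
--     "puppy": 0, "young": 0, "new dog": 0, "puppy school": 0,
--     "behavior": 1, "behaviour": 1, "aggressive": 1, "bark": 1, "anxiety": 1, "fear": 1,
--     "obedience": 2, "command": 2, "sit": 2, "stay": 2, "come": 2, "heel": 2,
-- }
--
-- # Per-category render data: (category, title prefix, subtitle, icon, reason, cta, service_type)
-- _TEMPLATES = [
--     ("puppy_training", "Puppy School for ", "Foundation training for young dogs",
--      "\U0001F415", "Set the right foundations early", "Enroll Now", "puppy_school"),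
--     ("behavior", "Behavior Training for ", "Address behavioral challenges",
--      "\U0001F9E0", "Expert behavioral guidance", "Book Consultation", "behavior_training"),
--     ("obedience", "Obedience Classes for ", "Basic to advanced commands",
--      "\U0001F393", "Well-mannered companion", "View Classes", "obedience_training"),
-- ]
--
-- def _generate_learn_picks(user_msg: str, pet_name: str, pet_context: Dict) -> List[Dict]:
--     # One pass over the flat keyword index, collect matched category ids as a set,
--     # sort the ids to recover the fixed category order, then render each template.
--     matched = sorted({cid for kw, cid in _KEYWORD_CATEGORY.items() if kw in user_msg})
--     picks = []
--     for cid in matched: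
--         cat, prefix, subtitle, icon, reason, cta, st = _TEMPLATES[cid]
--         picks.append({
--             "type": "service",
--             "category": cat,
--             "title": prefix + pet_name,
--             "subtitle": subtitle,
--             "icon": icon,
--             "reason": reason,
--             "cta": cta,
--             "service_type": st,
--         })
--     if not picks:
--         return [{
--             "type": "service",
--             "category": "learn_consult",
--             "title": f"Training Consultation for {pet_name}",
--             "subtitle": "Personalized learning plan",
--             "icon": "\U0001F4DA",
--             "reason": f"Help {pet_name} reach their potential",
--             "cta": "Get Started",
--             "service_type": "training_consultation",
--         }]
--     return picks
-- ===== Notes on version B (the rewrite author's own statement) =====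
-- stated objective: alternative
-- what changed: Replaced the three per-category if/any-append blocks with a flat inverted keyword-to-category-id index scanned in one pass; matched ids are collected into a set, sorted to recover the fixed category order, and rendered from a template table, with the same empty-case fallback.
import Mathlib
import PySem

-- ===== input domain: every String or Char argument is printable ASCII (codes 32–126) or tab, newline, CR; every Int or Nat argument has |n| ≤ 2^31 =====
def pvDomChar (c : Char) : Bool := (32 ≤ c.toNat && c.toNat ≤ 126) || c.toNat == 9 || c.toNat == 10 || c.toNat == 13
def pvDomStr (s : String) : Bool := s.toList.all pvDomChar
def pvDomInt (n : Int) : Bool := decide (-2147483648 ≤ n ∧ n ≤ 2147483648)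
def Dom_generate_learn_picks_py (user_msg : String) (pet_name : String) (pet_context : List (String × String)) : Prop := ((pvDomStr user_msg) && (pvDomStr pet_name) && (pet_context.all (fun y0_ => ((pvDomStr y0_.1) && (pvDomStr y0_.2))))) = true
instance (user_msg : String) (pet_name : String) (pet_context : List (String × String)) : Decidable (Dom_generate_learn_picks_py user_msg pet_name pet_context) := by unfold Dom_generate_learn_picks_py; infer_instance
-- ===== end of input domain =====

-- B replaces A's three inline keyword-check/append blocks by a flat inverted
-- keyword->category-id index scanned once, a set of matched ids sorted back into
-- category order, and a template table (objective: alternative; return values proved equal).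

-- ===== PORT A =====
def generate_learn_picks_py (user_msg : String) (pet_name : String) (_pet_context : List (String × String)) : List (List (String × String)) :=
  let picks : List (List (String × String)) := []
  let picks :=
    if ["puppy", "young", "new dog", "puppy school"].any (fun kw => PySem.Str.isIn kw user_msg) then
      picks ++ [[("type", "service"), ("category", "puppy_training"),
        ("title", "Puppy School for " ++ pet_name),
        ("subtitle", "Foundation training for young dogs"), ("icon", "🐕"),
        ("reason", "Set the right foundations early"), ("cta", "Enroll Now"),
        ("service_type", "puppy_school")]]
    else picks
  let picks :=
    if ["behavior", "behaviour", "aggressive", "bark", "anxiety", "fear"].any (fun kw => PySem.Str.isIn kw user_msg) then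
      picks ++ [[("type", "service"), ("category", "behavior"),
        ("title", "Behavior Training for " ++ pet_name),
        ("subtitle", "Address behavioral challenges"), ("icon", "🧠"),
        ("reason", "Expert behavioral guidance"), ("cta", "Book Consultation"),
        ("service_type", "behavior_training")]]
    else picks
  let picks :=
    if ["obedience", "command", "sit", "stay", "come", "heel"].any (fun kw => PySem.Str.isIn kw user_msg) then
      picks ++ [[("type", "service"), ("category", "obedience"),
        ("title", "Obedience Classes for " ++ pet_name),
        ("subtitle", "Basic to advanced commands"), ("icon", "🎓"),
        ("reason", "Well-mannered companion"), ("cta", "View Classes"),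
        ("service_type", "obedience_training")]]
    else picks
  if picks.isEmpty then
    [[("type", "service"), ("category", "learn_consult"),
      ("title", "Training Consultation for " ++ pet_name),
      ("subtitle", "Personalized learning plan"), ("icon", "📚"),
      ("reason", "Help " ++ pet_name ++ " reach their potential"), ("cta", "Get Started"),
      ("service_type", "training_consultation")]]
  else picks

-- ===== PORT B =====
-- flat inverted index: keyword -> category id (0 = puppy, 1 = behavior, 2 = obedience)
def pvKwIndex : List (String × Nat) :=
  [("puppy", 0), ("young", 0), ("new dog", 0), ("puppy school", 0),
   ("behavior", 1), ("behaviour", 1), ("aggressive", 1), ("bark", 1), ("anxiety", 1), ("fear", 1),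
   ("obedience", 2), ("command", 2), ("sit", 2), ("stay", 2), ("come", 2), ("heel", 2)]

-- the set comprehension's generator: matched category ids, one pass over the flat index
def pvMatchedIds (user_msg : String) : List Nat :=
  pvKwIndex.filterMap (fun p => if PySem.Str.isIn p.1 user_msg then some p.2 else none)

-- per-category render data: (category, title prefix, subtitle, icon, reason, cta, service_type)
def pvTemplates : List (String × String × String × String × String × String × String) :=
  [("puppy_training", "Puppy School for ", "Foundation training for young dogs",
    "🐕", "Set the right foundations early", "Enroll Now", "puppy_school"),
   ("behavior", "Behavior Training for ", "Address behavioral challenges",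
    "🧠", "Expert behavioral guidance", "Book Consultation", "behavior_training"),
   ("obedience", "Obedience Classes for ", "Basic to advanced commands",
    "🎓", "Well-mannered companion", "View Classes", "obedience_training")]

def generate_learn_picks_py_alt (user_msg : String) (pet_name : String) (_pet_context : List (String × String)) : List (List (String × String)) :=
  let matched := PySem.List.sorted (PySem.Set.ofList (pvMatchedIds user_msg)) (fun x => x) false
  let picks := matched.map (fun cid =>
    let t := pvTemplates.getD cid ("", "", "", "", "", "", "")
    [("type", "service"), ("category", t.1), ("title", t.2.1 ++ pet_name),
     ("subtitle", t.2.2.1), ("icon", t.2.2.2.1), ("reason", t.2.2.2.2.1),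
     ("cta", t.2.2.2.2.2.1), ("service_type", t.2.2.2.2.2.2)])
  if picks.isEmpty then
    [[("type", "service"), ("category", "learn_consult"),
      ("title", "Training Consultation for " ++ pet_name),
      ("subtitle", "Personalized learning plan"), ("icon", "📚"),
      ("reason", "Help " ++ pet_name ++ " reach their potential"), ("cta", "Get Started"),
      ("service_type", "training_consultation")]]
  else picks

-- ===== PRECONDITION & SPEC =====
def Spec_generate_learn_picks_py (user_msg : String) (pet_name : String) (pet_context : List (String × String)) (out : List (List (String × String))) : Prop := out = generate_learn_picks_py_alt user_msg pet_name pet_context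
instance (user_msg : String) (pet_name : String) (pet_context : List (String × String)) (out : List (List (String × String))) : Decidable (Spec_generate_learn_picks_py user_msg pet_name pet_context out) := by unfold Spec_generate_learn_picks_py; infer_instance

-- ===== CLAIM (what is proved, stated in full; the proofs are below) =====
def Claim_equal_generate_learn_picks_py : Prop := ∀ (user_msg : String) (pet_name : String) (pet_context : List (String × String)), Dom_generate_learn_picks_py user_msg pet_name pet_context → Spec_generate_learn_picks_py user_msg pet_name pet_context (generate_learn_picks_py user_msg pet_name pet_context)

-- ===== LEMMAS AND PROOFS =====

-- membership in the filterMap over any keyword index is an `any` over that index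
lemma mem_filterMap_if (xs : List (String × Nat)) (um : String) (n : Nat) :
    n ∈ xs.filterMap (fun p => if PySem.Str.isIn p.1 um then some p.2 else none) ↔
      xs.any (fun p => PySem.Str.isIn p.1 um && p.2 == n) = true := by
  induction xs with
  | nil => simp
  | cons a as ih =>
    rw [List.filterMap_cons, List.any_cons]
    cases h : PySem.Str.isIn a.1 um
    · simp only [Bool.false_eq_true, if_false, Bool.false_and, Bool.false_or, ih]
    · simp only [if_true, List.mem_cons, Bool.true_and, Bool.or_eq_true, beq_iff_eq, ih]
      constructor
      · rintro (rfl | hm)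
        · exact Or.inl rfl
        · exact Or.inr hm
      · rintro (rfl | hm)
        · exact Or.inl rfl
        · exact Or.inr hm

-- id n is collected iff one of its keywords occurs in the message (expanded form)
set_option maxHeartbeats 1000000 in
lemma mem_pvMatchedIds (um : String) (n : Nat) :
    n ∈ pvMatchedIds um ↔
      ((PySem.Str.isIn "puppy" um = true ∨ PySem.Str.isIn "young" um = true ∨ PySem.Str.isIn "new dog" um = true ∨ PySem.Str.isIn "puppy school" um = true) ∧ 0 = n)
      ∨ ((PySem.Str.isIn "behavior" um = true ∨ PySem.Str.isIn "behaviour" um = true ∨ PySem.Str.isIn "aggressive" um = true ∨ PySem.Str.isIn "bark" um = true ∨ PySem.Str.isIn "anxiety" um = true ∨ PySem.Str.isIn "fear" um = true) ∧ 1 = n)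
      ∨ ((PySem.Str.isIn "obedience" um = true ∨ PySem.Str.isIn "command" um = true ∨ PySem.Str.isIn "sit" um = true ∨ PySem.Str.isIn "stay" um = true ∨ PySem.Str.isIn "come" um = true ∨ PySem.Str.isIn "heel" um = true) ∧ 2 = n) := by
  rw [pvMatchedIds, mem_filterMap_if]
  simp only [pvKwIndex, List.any_cons, List.any_nil, Bool.or_eq_true, Bool.and_eq_true,
    beq_iff_eq, Bool.false_eq_true, or_false, or_and_right, or_assoc]

-- the same, phrased with A's three `any` conditions
lemma mem_pvMatchedIds' (um : String) (n : Nat) :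
    n ∈ pvMatchedIds um ↔
      (n = 0 ∧ (["puppy", "young", "new dog", "puppy school"].any (fun kw => PySem.Str.isIn kw um)) = true)
      ∨ (n = 1 ∧ (["behavior", "behaviour", "aggressive", "bark", "anxiety", "fear"].any (fun kw => PySem.Str.isIn kw um)) = true)
      ∨ (n = 2 ∧ (["obedience", "command", "sit", "stay", "come", "heel"].any (fun kw => PySem.Str.isIn kw um)) = true) := by
  rw [mem_pvMatchedIds]
  simp only [List.any_cons, List.any_nil, Bool.or_eq_true, Bool.false_eq_true, or_false]
  constructor
  · rintro (⟨h, rfl⟩ | ⟨h, rfl⟩ | ⟨h, rfl⟩)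
    · exact Or.inl ⟨rfl, h⟩
    · exact Or.inr (Or.inl ⟨rfl, h⟩)
    · exact Or.inr (Or.inr ⟨rfl, h⟩)
  · rintro (⟨rfl, h⟩ | ⟨rfl, h⟩ | ⟨rfl, h⟩)
    · exact Or.inl ⟨h, rfl⟩
    · exact Or.inr (Or.inl ⟨h, rfl⟩)
    · exact Or.inr (Or.inr ⟨h, rfl⟩)

-- sorted(set(matched ids)) is exactly the ids of A's satisfied conditions, in order
set_option maxHeartbeats 1000000 in
lemma sorted_matched (um : String) :
    PySem.List.sorted (PySem.Set.ofList (pvMatchedIds um)) (fun x => x) false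
      = (if ["puppy", "young", "new dog", "puppy school"].any (fun kw => PySem.Str.isIn kw um) then [0] else [])
        ++ (if ["behavior", "behaviour", "aggressive", "bark", "anxiety", "fear"].any (fun kw => PySem.Str.isIn kw um) then [1] else [])
        ++ (if ["obedience", "command", "sit", "stay", "come", "heel"].any (fun kw => PySem.Str.isIn kw um) then [2] else []) := by
  cases h1 : ["puppy", "young", "new dog", "puppy school"].any (fun kw => PySem.Str.isIn kw um) <;>
  cases h2 : ["behavior", "behaviour", "aggressive", "bark", "anxiety", "fear"].any (fun kw => PySem.Str.isIn kw um) <;>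
  cases h3 : ["obedience", "command", "sit", "stay", "come", "heel"].any (fun kw => PySem.Str.isIn kw um) <;>
  simp only [Bool.false_eq_true, if_false, if_true, List.nil_append, List.append_nil, List.append_assoc] <;>
  (apply PySem.List.sorted_eq_of_perm_of_pairwise_lt
   · rw [List.perm_ext_iff_of_nodup (by decide) (PySem.Set.nodup_ofList _)]
     intro a
     rw [PySem.Set.mem_ofList, mem_pvMatchedIds' um a]
     simp only [h1, h2, h3, Bool.false_eq_true, and_true, and_false, or_false, false_or,
       List.mem_cons, List.mem_append, List.not_mem_nil]
   · decide)

-- ===== VERDICT (by name: the statement is the Claim_ definition above) =====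
set_option maxHeartbeats 1000000 in
theorem generate_learn_picks_py_spec : Claim_equal_generate_learn_picks_py := by
  intro um pn ctx _
  unfold Spec_generate_learn_picks_py
  simp only [generate_learn_picks_py, generate_learn_picks_py_alt, sorted_matched]
  cases h1 : ["puppy", "young", "new dog", "puppy school"].any (fun kw => PySem.Str.isIn kw um) <;>
  cases h2 : ["behavior", "behaviour", "aggressive", "bark", "anxiety", "fear"].any (fun kw => PySem.Str.isIn kw um) <;>
  cases h3 : ["obedience", "command", "sit", "stay", "come", "heel"].any (fun kw => PySem.Str.isIn kw um) <;>
  rfl
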